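-- pv_equiv track=rewrite | github.com/pritamleo841/exam-analyzer | analyzers/predictor.py | _parse_generated_questions
-- ===== SOURCE A (Python) =====
-- def _parse_generated_questions(response: str) -> list[str]:
--     """Parse AI response into individual question strings."""
--     questions = []
--     current = []
--
--     for line in response.strip().split("\n"):
--         line = line.strip()
--         if line.startswith("Q:") or line.startswith("Q ") or (
--             line and line[0].isdigit() and "." in line[:3]
--         ):
--             if current:
--                 questions.append("\n".join(current))
--             current = [line]
--         elif current:
--             current.append(line)
--
--     if current:
--         questions.append("\n".join(current))
--
--     return questions if questions else [response]
-- ===== SOURCE B (Python) =====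
-- def _parse_generated_questions(response: str) -> list[str]:
--     """Parse AI response into individual question strings."""
--     def is_header(l):
--         return l.startswith("Q:") or l.startswith("Q ") or (
--             l and l[0].isdigit() and "." in l[:3]
--         )
--
--     lines = [l.strip() for l in response.strip().split("\n")]
--     starts = [i for i, l in enumerate(lines) if is_header(l)]
--     if not starts:
--         return [response]
--     ends = starts[1:] + [len(lines)]
--     return ["\n".join(lines[s:e]) for s, e in zip(starts, ends)]
-- ===== Notes on version B (the rewrite author's own statement) =====
-- stated objective: alternative
-- what changed: B replaces A's stateful questions/current accumulator loop by collecting all header-line indices in one pass and then slicing the stripped line list between consecutive header indices, joining each slice.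
import Mathlib
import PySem

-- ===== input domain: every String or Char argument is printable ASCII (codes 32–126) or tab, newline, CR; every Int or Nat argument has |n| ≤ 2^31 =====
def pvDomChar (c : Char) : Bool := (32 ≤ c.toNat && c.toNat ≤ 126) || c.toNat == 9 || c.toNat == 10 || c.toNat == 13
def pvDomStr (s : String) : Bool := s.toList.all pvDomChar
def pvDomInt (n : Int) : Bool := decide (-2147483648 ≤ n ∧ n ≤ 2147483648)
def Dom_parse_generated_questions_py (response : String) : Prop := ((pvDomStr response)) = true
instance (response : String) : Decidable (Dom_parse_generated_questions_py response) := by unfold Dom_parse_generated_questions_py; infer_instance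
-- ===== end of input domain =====

-- B replaces A's stateful questions/current accumulator loop by collecting all header
-- indices in one scan and slicing the line list between consecutive headers (objective:
-- alternative decomposition; same return value, no side effects).

-- shared header test: line.startswith("Q:") or line.startswith("Q ")
-- or (line and line[0].isdigit() and "." in line[:3])   (identical in A and Source B)
def pvHdr (l : String) : Bool :=
  PySem.Str.startswith l "Q:" || PySem.Str.startswith l "Q " ||
    (!(l == "") &&
      (match PySem.Str.pyGet? l 0 with
       | some c => PySem.Chars.isdigit c
       | none => false) &&
      PySem.Str.isIn "." (PySem.Str.slice l none (some 3)))

-- ===== PORT A =====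
-- the for-loop over the lines, state (questions, current); final flush in the [] case
def pvGoA : List String → List String → List String → List String
  | [], questions, current =>
      if current = [] then questions else questions ++ [PySem.Str.join "\n" current]
  | l :: ls, questions, current =>
      let line := PySem.Str.strip l
      if pvHdr line then
        pvGoA ls (if current = [] then questions else questions ++ [PySem.Str.join "\n" current]) [line]
      else if current = [] then pvGoA ls questions current
      else pvGoA ls questions (current ++ [line])

def parse_generated_questions_py (response : String) : List String :=
  -- split? is none only for sep = ""; sep is "\n" here
  let qs := pvGoA ((PySem.Str.split? (PySem.Str.strip response) "\n").getD []) [] []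
  if qs = [] then [response] else qs

-- ===== PORT B =====
def parse_generated_questions_py_alt (response : String) : List String :=
  let lines := ((PySem.Str.split? (PySem.Str.strip response) "\n").getD []).map PySem.Str.strip
  let starts := (PySem.List.enumerate lines).filterMap
    (fun p => if pvHdr p.2 then some p.1 else none)
  if starts = [] then [response]
  else
    let ends := starts.drop 1 ++ [(lines.length : Int)]
    (starts.zip ends).map
      (fun p => PySem.Str.join "\n" (PySem.List.slice lines (some p.1) (some p.2)))

-- ===== PRECONDITION & SPEC =====
def Spec_parse_generated_questions_py (response : String) (out : List String) : Prop := out = parse_generated_questions_py_alt response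
instance (response : String) (out : List String) : Decidable (Spec_parse_generated_questions_py response out) := by unfold Spec_parse_generated_questions_py; infer_instance

-- ===== CLAIM (what is proved, stated in full; the proofs are below) =====
def Claim_equal_parse_generated_questions_py : Prop := ∀ (response : String), Dom_parse_generated_questions_py response → Spec_parse_generated_questions_py response (parse_generated_questions_py response)

-- ===== LEMMAS AND PROOFS =====

-- A's loop with the per-line strip factored out
def pvG : List String → List String → List String → List String
  | [], qs, cur => if cur = [] then qs else qs ++ [PySem.Str.join "\n" cur]
  | l :: ls, qs, cur =>
      if pvHdr l then
        pvG ls (if cur = [] then qs else qs ++ [PySem.Str.join "\n" cur]) [l]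
      else if cur = [] then pvG ls qs cur
      else pvG ls qs (cur ++ [l])

lemma pvGoA_eq_pvG : ∀ (lines qs cur : List String),
    pvGoA lines qs cur = pvG (lines.map PySem.Str.strip) qs cur := by
  intro lines
  induction lines with
  | nil => intro qs cur; rfl
  | cons l ls ih =>
      intro qs cur
      simp only [pvGoA, pvG, List.map_cons]
      split_ifs <;> apply ih

-- header indices, Nat-valued
def pvStarts : List String → List Nat
  | [] => []
  | l :: ls => if pvHdr l then 0 :: (pvStarts ls).map (· + 1) else (pvStarts ls).map (· + 1)

lemma pvStarts_enum : ∀ (lines : List String) (k : Int),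
    (PySem.List.enumerate lines k).filterMap (fun p => if pvHdr p.2 then some p.1 else none)
      = (pvStarts lines).map (fun n : Nat => ((n : Int) + k)) := by
  intro lines
  induction lines with
  | nil => intro k; rfl
  | cons l ls ih =>
      intro k
      rw [PySem.List.enumerate_cons]
      simp only [List.filterMap_cons, pvStarts]
      by_cases h : pvHdr l
      · simp only [h, if_true, ih (k + 1), List.map_cons, List.map_map]
        congr 1
        · push_cast; ring
        · apply List.map_congr_left; intro a _
          simp only [Function.comp_apply]; push_cast; ring
      · simp only [h, if_false, Bool.false_eq_true, ih (k + 1), List.map_map]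
        apply List.map_congr_left; intro a _
        simp only [Function.comp_apply]; push_cast; ring

-- B's groups, in take/drop form over Nat indices
def pvBg (lines : List String) : List String :=
  ((pvStarts lines).zip ((pvStarts lines).drop 1 ++ [lines.length])).map
    (fun p => PySem.Str.join "\n" (List.take (p.2 - p.1) (List.drop p.1 lines)))

set_option maxHeartbeats 1000000 in
lemma pvAlt_eq (response : String) :
    parse_generated_questions_py_alt response =
      (let lines := ((PySem.Str.split? (PySem.Str.strip response) "\n").getD []).map PySem.Str.strip
       if pvStarts lines = [] then [response] else pvBg lines) := by
  unfold parse_generated_questions_py_alt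
  simp only []
  set lines := ((PySem.Str.split? (PySem.Str.strip response) "\n").getD []).map PySem.Str.strip with hl
  rw [pvStarts_enum lines 0]
  simp only [add_zero]
  by_cases hs : pvStarts lines = []
  · simp [hs]
  · have h1 : (pvStarts lines).map (fun n : Nat => (n : Int)) ≠ [] := by simpa using hs
    rw [if_neg h1, if_neg hs]
    unfold pvBg
    rw [show ((pvStarts lines).map (fun n : Nat => (n : Int))).drop 1 ++ [(lines.length : Int)]
          = ((pvStarts lines).drop 1 ++ [lines.length]).map (fun n : Nat => (n : Int)) by
        simp]
    rw [List.zip_map]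
    rw [List.map_map]
    apply List.map_congr_left
    intro p _
    simp [PySem.List.slice_natCast]

-- accumulator independence of A's loop
lemma pvG_acc : ∀ (ls qs qs' cur : List String),
    pvG ls (qs ++ qs') cur = qs ++ pvG ls qs' cur := by
  intro ls
  induction ls with
  | nil => intro qs qs' cur; simp only [pvG]; split_ifs <;> simp
  | cons l ls ih =>
      intro qs qs' cur
      simp only [pvG]
      split_ifs with h1 h2 h2
      · simp [ih]
      · rw [List.append_assoc]; exact ih ..
      · exact ih ..
      · exact ih ..

-- pvStarts = [] means no header anywhere
lemma pvStarts_nil_iff : ∀ (ls : List String),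
    pvStarts ls = [] ↔ ∀ l ∈ ls, pvHdr l = false := by
  intro ls
  induction ls with
  | nil => simp [pvStarts]
  | cons l ls ih =>
      simp only [pvStarts]
      by_cases h : pvHdr l <;> simp [h, ih]

-- the first header index bounds the takeWhile prefix
lemma pvTakeWhile_eq_take : ∀ (ls : List String) (s0 : Nat) (rest : List Nat),
    pvStarts ls = s0 :: rest →
    List.takeWhile (fun l => !pvHdr l) ls = ls.take s0 := by
  intro ls
  induction ls with
  | nil => intro s0 rest h; simp [pvStarts] at h
  | cons l ls ih =>
      intro s0 rest h
      simp only [pvStarts] at h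
      by_cases hl : pvHdr l
      · simp [hl] at h
        simp [hl, ← h.1]
      · simp [hl] at h
        match hs : pvStarts ls with
        | [] => rw [hs] at h; simp at h
        | a :: r =>
            rw [hs] at h
            simp at h
            rw [← h.1]
            simp [hl, ih a r hs]

-- loop characterisation while current ≠ []
lemma pvG_char : ∀ (ls cur : List String), cur ≠ [] →
    pvG ls [] cur = PySem.Str.join "\n" (cur ++ List.takeWhile (fun l => !pvHdr l) ls)
      :: pvG (List.dropWhile (fun l => !pvHdr l) ls) [] [] := by
  intro ls
  induction ls with
  | nil => intro cur h; simp [pvG, h]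
  | cons l ls ih =>
      intro cur h
      by_cases hl : pvHdr l
      · have hacc := pvG_acc ls [PySem.Str.join "\n" cur] [] [l]
        simp only [List.append_nil] at hacc
        simp only [pvG, if_pos hl, if_neg h, List.nil_append]
        rw [hacc]
        simp [pvG, hl]
      · simp only [pvG, if_neg h, List.takeWhile_cons, List.dropWhile_cons, hl,
          Bool.not_false]
        rw [ih (cur ++ [l]) (by simp)]
        simp

-- skipping leading non-headers does not change the empty-state loop
lemma pvG_dropWhile : ∀ (ls : List String),
    pvG (List.dropWhile (fun l => !pvHdr l) ls) [] [] = pvG ls [] [] := by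
  intro ls
  induction ls with
  | nil => rfl
  | cons l ls ih =>
      by_cases hl : pvHdr l
      · simp [hl]
      · have h2 : pvG (l :: ls) [] [] = pvG ls [] [] := by simp [pvG, hl]
        rw [h2, List.dropWhile_cons]
        simpa [hl] using ih

-- main: A's loop computes B's slice groups
lemma pvBg_shift (l : String) (ls : List String) (s t : List Nat) :
    (((s.map (fun x => x + 1)).zip ((t.map (fun x => x + 1)) ++ [ls.length + 1])).map
        (fun p => PySem.Str.join "\n" (List.take (p.2 - p.1) (List.drop p.1 (l :: ls)))))
      = ((s.zip (t ++ [ls.length])).map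
        (fun p => PySem.Str.join "\n" (List.take (p.2 - p.1) (List.drop p.1 ls)))) := by
  rw [show (t.map (fun x => x + 1)) ++ [ls.length + 1] = (t ++ [ls.length]).map (fun x => x + 1) by
    simp]
  rw [List.zip_map, List.map_map]
  apply List.map_congr_left
  intro p _
  simp [Nat.succ_sub_succ]

lemma pvG_eq_pvBg : ∀ (ls : List String), pvG ls [] [] = pvBg ls := by
  intro ls
  induction ls with
  | nil => rfl
  | cons l ls ih =>
      by_cases hl : pvHdr l
      · -- head is a header: first group is l up to the next header, rest is pvBg ls
        rw [show pvG (l :: ls) [] [] = pvG ls [] [l] from by simp [pvG, hl]]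
        rw [pvG_char ls [l] (by simp)]
        match hs : pvStarts ls with
        | [] =>
            have hall := (pvStarts_nil_iff ls).mp hs
            have ht : List.takeWhile (fun l => !pvHdr l) ls = ls :=
              List.takeWhile_eq_self_iff.mpr (by intro x hx; simp [hall x hx])
            have hd : List.dropWhile (fun l => !pvHdr l) ls = [] :=
              List.dropWhile_eq_nil_iff.mpr (by intro x hx; simp [hall x hx])
            rw [ht, hd]
            unfold pvBg
            simp [pvStarts, pvG, hl, hs, List.take_of_length_le]
        | s0 :: rest =>
            rw [pvTakeWhile_eq_take ls s0 rest hs, pvG_dropWhile, ih]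
            unfold pvBg
            simp only [pvStarts, if_pos hl, hs, List.drop_succ_cons, List.drop_zero,
              List.length_cons]
            rw [show (List.map (fun x : Nat => x + 1) (s0 :: rest)) ++ [ls.length + 1]
                  = (s0 + 1) :: (List.map (fun x : Nat => x + 1) rest ++ [ls.length + 1]) by simp]
            rw [List.zip_cons_cons, List.map_cons]
            rw [pvBg_shift l ls (s0 :: rest) rest]
            simp
      · -- head is not a header and current is empty: the line is dropped
        rw [show pvG (l :: ls) [] [] = pvG ls [] [] from by simp [pvG, hl]]
        rw [ih]
        unfold pvBg
        match hs : pvStarts ls with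
        | [] => simp [pvStarts, hl, hs]
        | s0 :: rest =>
            simp only [pvStarts, if_neg hl, hs, List.drop_succ_cons, List.drop_zero,
              List.length_cons]
            rw [show List.drop 1 (List.map (fun x : Nat => x + 1) (s0 :: rest))
                  = List.map (fun x : Nat => x + 1) rest by simp]
            rw [pvBg_shift l ls (s0 :: rest) rest]

lemma pvBg_ne_nil (ls : List String) (h : pvStarts ls ≠ []) : pvBg ls ≠ [] := by
  unfold pvBg
  match hs : pvStarts ls with
  | [] => exact absurd hs h
  | s0 :: rest => match rest with
    | [] => simp
    | b :: r => simp

-- ===== VERDICT (by name: the statement is the Claim_ definition above) =====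
theorem parse_generated_questions_py_spec : Claim_equal_parse_generated_questions_py := by
  unfold Claim_equal_parse_generated_questions_py
  intro response _
  unfold Spec_parse_generated_questions_py
  rw [pvAlt_eq]
  unfold parse_generated_questions_py
  simp only []
  rw [pvGoA_eq_pvG]
  set lines := ((PySem.Str.split? (PySem.Str.strip response) "\n").getD []).map PySem.Str.strip with hl
  rw [pvG_eq_pvBg]
  by_cases hs : pvStarts lines = []
  · have : pvBg lines = [] := by
      unfold pvBg; rw [hs]; rfl
    simp [hs, this]
  · simp [hs, pvBg_ne_nil lines hs]
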